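-- pv_equiv track=rewrite | github.com/my-wife-left-me/bigfoot-snowboarding | scraping/burton/burton_spider.py | determine_terrain_types
-- ===== SOURCE A (Python) =====
-- def determine_terrain_types(terrain_scores: dict) -> list:
--     """Determine terrain types using threshold logic"""
--     if not terrain_scores:
--         return None
--
--     for threshold in range(7, 0, -1):
--         candidates = {k: v for k, v in terrain_scores.items() if v >= threshold}
--
--         if not candidates:
--             continue
--
--         count = len(candidates)
--
--         if count == 1:
--             return list(candidates.keys())
--         elif count == 2:
--             return list(candidates.keys())
--         elif count >= 3:
--             sorted_terrains = sorted(
--                 candidates.items(), key=lambda x: x[1], reverse=True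
--             )
--             top_score = sorted_terrains[0][1]
--             second_score = sorted_terrains[1][1]
--
--             if sorted_terrains[2][1] < second_score:
--                 return [sorted_terrains[0][0], sorted_terrains[1][0]]
--             elif sorted_terrains[1][1] < top_score:
--                 return [sorted_terrains[0][0]]
--             else:
--                 return list(candidates.keys())
--
--     return list(terrain_scores.keys()) if terrain_scores else None
-- ===== SOURCE B (Python) =====
-- def determine_terrain_types(terrain_scores: dict) -> list:
--     """Same result as A: compute the max score once and derive the selected
--     threshold directly as t = min(7, max), instead of scanning thresholds 7..1."""
--     if not terrain_scores:
--         return None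
--     m = max(terrain_scores.values())
--     if m < 1:
--         return list(terrain_scores.keys())
--     t = min(7, m)
--     candidates = [(k, v) for k, v in terrain_scores.items() if v >= t]
--     if len(candidates) <= 2:
--         return [k for k, _ in candidates]
--     s = sorted(candidates, key=lambda x: x[1], reverse=True)
--     (k0, v0), (k1, v1), (k2, v2) = s[0], s[1], s[2]
--     if v2 < v1:
--         return [k0, k1]
--     if v1 < v0:
--         return [k0]
--     return [k for k, _ in candidates]
-- ===== Notes on version B (the rewrite author's own statement) =====
-- stated objective: simpler
-- what changed: Replaces the descending for-threshold-in-range(7,0,-1) scan (building a candidate dict per threshold) by computing the maximum score once, deriving the selected threshold directly as t = min(7, max) (or the fall-through when max < 1), and filtering candidates a single time before the same count-based decision.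
import Mathlib
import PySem

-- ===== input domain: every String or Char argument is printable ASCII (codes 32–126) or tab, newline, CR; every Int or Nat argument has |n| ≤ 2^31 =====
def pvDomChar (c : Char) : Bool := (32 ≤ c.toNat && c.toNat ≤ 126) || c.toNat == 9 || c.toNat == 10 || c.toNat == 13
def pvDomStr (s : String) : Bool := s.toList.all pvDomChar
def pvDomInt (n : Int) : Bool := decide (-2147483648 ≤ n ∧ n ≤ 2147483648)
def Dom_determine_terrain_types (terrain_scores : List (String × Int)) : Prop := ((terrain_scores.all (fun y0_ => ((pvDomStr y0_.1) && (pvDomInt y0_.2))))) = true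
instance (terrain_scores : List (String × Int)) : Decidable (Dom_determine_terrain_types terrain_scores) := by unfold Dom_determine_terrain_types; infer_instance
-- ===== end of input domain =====

-- B replaces A's descending 7-step threshold scan by computing the maximum score once
-- and deriving the selected threshold directly as t = min(7, max): objective = simpler.

-- ===== PORT A =====
-- the count == 1 / count == 2 / count >= 3 branch body of A's loop
def pvBranchA (cands : List (String × Int)) : Option (List String) :=
  if cands.length = 1 then some (cands.map Prod.fst)
  else if cands.length = 2 then some (cands.map Prod.fst)
  else
    match PySem.List.sorted cands (fun x => x.2) true with
    | a :: b :: c :: _ =>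
      if c.2 < b.2 then some [a.1, b.1]
      else if b.2 < a.2 then some [a.1]
      else some (cands.map Prod.fst)
    | _ => none  -- unreachable: this branch is only entered with 3 ≤ length

-- the 'for threshold in range(7, 0, -1)' loop; [] = fall-through after the loop
def pvLoopA (ts : List (String × Int)) : List Int → Option (List String)
  | [] => if ts = [] then none else some (ts.map Prod.fst)
  | t :: rest =>
    let cands := ts.filter (fun kv => decide (t ≤ kv.2))
    if cands = [] then pvLoopA ts rest else pvBranchA cands

def determine_terrain_types (terrain_scores : List (String × Int)) : Option (List String) :=
  if terrain_scores = [] then none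
  else pvLoopA terrain_scores (PySem.List.pyRange 7 0 (-1))

-- ===== PORT B =====
-- top-one / top-two decision on the value-sorted candidates (Source B's tail after the len<=2 branch)
def pvTopB (cands : List (String × Int)) : Option (List String) :=
  match PySem.List.sorted cands (fun x => x.2) true with
  | (k0, v0) :: (k1, v1) :: (_k2, v2) :: _ =>
    if v2 < v1 then some [k0, k1]
    else if v1 < v0 then some [k0]
    else some (cands.map Prod.fst)
  | _ => none

def determine_terrain_types_alt (terrain_scores : List (String × Int)) : Option (List String) :=
  match PySem.List.max? (terrain_scores.map Prod.snd) (fun v => v) with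
  | none => none                                    -- empty dict
  | some m =>
    if m < 1 then some (terrain_scores.map Prod.fst)
    else
      let t := min 7 m
      let cands := terrain_scores.filter (fun kv => decide (t ≤ kv.2))
      if cands.length ≤ 2 then some (cands.map Prod.fst)
      else pvTopB cands

-- ===== PRECONDITION & SPEC =====
def Spec_determine_terrain_types (terrain_scores : List (String × Int)) (out : Option (List String)) : Prop := out = determine_terrain_types_alt terrain_scores
instance (terrain_scores : List (String × Int)) (out : Option (List String)) : Decidable (Spec_determine_terrain_types terrain_scores out) := by unfold Spec_determine_terrain_types; infer_instance

-- ===== CLAIM (what is proved, stated in full; the proofs are below) =====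
def Claim_equal_determine_terrain_types : Prop := ∀ (terrain_scores : List (String × Int)), Dom_determine_terrain_types terrain_scores → Spec_determine_terrain_types terrain_scores (determine_terrain_types terrain_scores)

-- ===== LEMMAS AND PROOFS =====

-- A's branch body equals B's (len<=2 / top-one-two) decision on any nonempty candidate list
theorem pvBranch_eq (c : List (String × Int)) (hc : c ≠ []) :
    pvBranchA c = if c.length ≤ 2 then some (c.map Prod.fst) else pvTopB c := by
  unfold pvBranchA
  have hlen : 1 ≤ c.length := List.length_pos_iff.mpr hc
  by_cases h1 : c.length = 1
  · simp [h1]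
  · by_cases h2 : c.length = 2
    · simp [h2]
    · have h3 : 3 ≤ c.length := by omega
      rw [if_neg h1, if_neg h2, if_neg (by omega)]
      unfold pvTopB
      rcases hsl : PySem.List.sorted c (fun x => x.2) true with _ | ⟨a, _ | ⟨b, _ | ⟨d, rest⟩⟩⟩ <;> rfl

theorem pvLoop_skip (ts : List (String × Int)) (l₁ l₂ : List Int)
    (h : ∀ t ∈ l₁, ts.filter (fun kv => decide (t ≤ kv.2)) = []) :
    pvLoopA ts (l₁ ++ l₂) = pvLoopA ts l₂ := by
  induction l₁ with
  | nil => rfl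
  | cons t rest ih =>
    have ht := h t (by simp)
    simp only [List.cons_append, pvLoopA, ht]
    exact ih (fun t' ht' => h t' (by simp [ht']))

theorem pvLoop_hit (ts : List (String × Int)) (t : Int) (rest : List Int)
    (h : ts.filter (fun kv => decide (t ≤ kv.2)) ≠ []) :
    pvLoopA ts (t :: rest) = pvBranchA (ts.filter (fun kv => decide (t ≤ kv.2))) := by
  simp only [pvLoopA, if_neg h]

-- ===== VERDICT (by name: the statement is the Claim_ definition above) =====
theorem determine_terrain_types_spec : Claim_equal_determine_terrain_types := by
  intro ts _
  unfold Spec_determine_terrain_types determine_terrain_types determine_terrain_types_alt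
  by_cases hts : ts = []
  · subst hts; rfl
  · rw [if_neg hts]
    obtain ⟨m, hm⟩ : ∃ m, PySem.List.max? (ts.map Prod.snd) (fun v => v) = some m := by
      rcases h : PySem.List.max? (ts.map Prod.snd) (fun v => v) with _ | m
      · exact absurd ((PySem.List.max?_eq_none_iff _ _).mp h) (by simpa using hts)
      · exact ⟨m, rfl⟩
    rw [hm]
    dsimp only
    have hub : ∀ kv ∈ ts, kv.2 ≤ m := fun kv hkv =>
      PySem.List.max?_isMax hm kv.2 (List.mem_map.mpr ⟨kv, hkv, rfl⟩)
    have hfl : ∀ t : Int, m < t → ts.filter (fun kv => decide (t ≤ kv.2)) = [] := by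
      intro t hlt
      rw [List.filter_eq_nil_iff]
      intro kv hkv
      have := hub kv hkv
      simp only [decide_eq_true_eq]
      omega
    have hfne : ∀ t : Int, t ≤ m → ts.filter (fun kv => decide (t ≤ kv.2)) ≠ [] := by
      intro t hle hcon
      obtain ⟨kv, hkv, he⟩ := List.mem_map.mp (PySem.List.max?_mem hm)
      have : kv ∈ ts.filter (fun kv => decide (t ≤ kv.2)) :=
        List.mem_filter.mpr ⟨hkv, by simp only [decide_eq_true_eq]; omega⟩
      rw [hcon] at this
      exact (List.not_mem_nil this)
    have hr : PySem.List.pyRange 7 0 (-1) = [7, 6, 5, 4, 3, 2, 1] := by decide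
    by_cases hm1 : m < 1
    · rw [if_pos hm1, hr,
        show ([7, 6, 5, 4, 3, 2, 1] : List Int) = [7, 6, 5, 4, 3, 2, 1] ++ [] from by simp,
        pvLoop_skip ts _ _ (fun t ht => hfl t (by fin_cases ht <;> omega))]
      simp [pvLoopA, hts]
    · rw [if_neg hm1]
      by_cases h7 : 7 ≤ m
      · rw [hr, pvLoop_hit ts 7 _ (hfne 7 h7), pvBranch_eq _ (hfne 7 h7),
          show min 7 m = 7 from by omega]
      · have hb : 1 ≤ m ∧ m ≤ 6 := by omega
        obtain ⟨hb1, hb2⟩ := hb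
        interval_cases m
        · rw [hr, show ([7, 6, 5, 4, 3, 2, 1] : List Int) = [7, 6, 5, 4, 3, 2] ++ 1 :: [] from rfl,
            pvLoop_skip ts _ _ (fun t ht => hfl t (by fin_cases ht <;> omega)),
            pvLoop_hit ts 1 _ (hfne 1 (by omega)),
            pvBranch_eq _ (hfne 1 (by omega))]
          rw [show min 7 (1 : Int) = 1 from by norm_num]
        · rw [hr, show ([7, 6, 5, 4, 3, 2, 1] : List Int) = [7, 6, 5, 4, 3] ++ 2 :: [1] from rfl,
            pvLoop_skip ts _ _ (fun t ht => hfl t (by fin_cases ht <;> omega)),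
            pvLoop_hit ts 2 _ (hfne 2 (by omega)),
            pvBranch_eq _ (hfne 2 (by omega))]
          rw [show min 7 (2 : Int) = 2 from by norm_num]
        · rw [hr, show ([7, 6, 5, 4, 3, 2, 1] : List Int) = [7, 6, 5, 4] ++ 3 :: [2, 1] from rfl,
            pvLoop_skip ts _ _ (fun t ht => hfl t (by fin_cases ht <;> omega)),
            pvLoop_hit ts 3 _ (hfne 3 (by omega)),
            pvBranch_eq _ (hfne 3 (by omega))]
          rw [show min 7 (3 : Int) = 3 from by norm_num]
        · rw [hr, show ([7, 6, 5, 4, 3, 2, 1] : List Int) = [7, 6, 5] ++ 4 :: [3, 2, 1] from rfl,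
            pvLoop_skip ts _ _ (fun t ht => hfl t (by fin_cases ht <;> omega)),
            pvLoop_hit ts 4 _ (hfne 4 (by omega)),
            pvBranch_eq _ (hfne 4 (by omega))]
          rw [show min 7 (4 : Int) = 4 from by norm_num]
        · rw [hr, show ([7, 6, 5, 4, 3, 2, 1] : List Int) = [7, 6] ++ 5 :: [4, 3, 2, 1] from rfl,
            pvLoop_skip ts _ _ (fun t ht => hfl t (by fin_cases ht <;> omega)),
            pvLoop_hit ts 5 _ (hfne 5 (by omega)),
            pvBranch_eq _ (hfne 5 (by omega))]
          rw [show min 7 (5 : Int) = 5 from by norm_num]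
        · rw [hr, show ([7, 6, 5, 4, 3, 2, 1] : List Int) = [7] ++ 6 :: [5, 4, 3, 2, 1] from rfl,
            pvLoop_skip ts _ _ (fun t ht => hfl t (by fin_cases ht <;> omega)),
            pvLoop_hit ts 6 _ (hfne 6 (by omega)),
            pvBranch_eq _ (hfne 6 (by omega))]
          rw [show min 7 (6 : Int) = 6 from by norm_num]
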